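-- pv_equiv track=rewrite | github.com/predatorx7/cmdar | cmdar.py | __main_aliases
-- ===== SOURCE A (Python) =====
-- from typing import List
--
-- def __main_aliases(__aliases) -> List[str]:
--     'First short & long alias'
--     al = []
--     has_short_alias = False
--     has_long_alias = False
--     for alias in __aliases:
--         if has_short_alias and has_long_alias:
--             break
--         is_long_name = alias[:2] == '--'
--         if is_long_name:
--             if has_long_alias: continue
--             has_long_alias = True
--         else:
--             if has_short_alias: continue
--             has_short_alias = True
--
--         al.append(alias)
--
--     return al
-- ===== SOURCE B (Python) =====
-- def __main_aliases(__aliases):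
--     'First short & long alias'
--     shorts = [a for a in __aliases if a[:2] != '--']
--     longs = [a for a in __aliases if a[:2] == '--']
--     if not __aliases:
--         return []
--     if __aliases[0][:2] == '--':
--         return longs[:1] + shorts[:1]
--     return shorts[:1] + longs[:1]
-- ===== Notes on version B (the rewrite author's own statement) =====
-- stated objective: alternative
-- what changed: Replaces the single interleaved loop with two boolean flags by two whole-list filters (shorts/longs), taking the first of each and ordering the two picks by the category of the first element.
import Mathlib
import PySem

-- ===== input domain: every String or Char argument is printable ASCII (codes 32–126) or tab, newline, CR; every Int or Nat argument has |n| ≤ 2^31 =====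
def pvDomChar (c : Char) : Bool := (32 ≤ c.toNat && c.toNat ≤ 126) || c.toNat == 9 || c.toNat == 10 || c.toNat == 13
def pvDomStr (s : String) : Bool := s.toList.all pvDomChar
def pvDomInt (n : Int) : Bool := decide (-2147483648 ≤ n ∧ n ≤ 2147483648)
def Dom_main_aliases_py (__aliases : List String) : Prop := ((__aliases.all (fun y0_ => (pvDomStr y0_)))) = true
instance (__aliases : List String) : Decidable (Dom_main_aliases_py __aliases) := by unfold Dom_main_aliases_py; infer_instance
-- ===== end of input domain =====

-- B replaces A's interleaved flag-loop by two whole-list filters plus an ordering decision on the first element (alternative decomposition, same O(n) cost).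

-- ===== PORT A =====
-- shared helper: Python's `als[:2] == '--'` (both programs use this exact test)
def pvIsLong (als : String) : Bool := PySem.Str.slice als none (some 2) == "--"

-- the for-loop of A, state = (accumulated al, has_short_alias, has_long_alias)
def pvGoA : List String → List String → Bool → Bool → List String
  | [], al, _, _ => al
  | als :: rest, al, hs, hl =>
    if hs && hl then al            -- break
    else if pvIsLong als then
      if hl then pvGoA rest al hs hl            -- continue
      else pvGoA rest (al ++ [als]) hs true
    else
      if hs then pvGoA rest al hs hl            -- continue
      else pvGoA rest (al ++ [als]) true hl

def main_aliases_py (__aliases : List String) : List String :=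
  pvGoA __aliases [] false false

-- ===== PORT B =====
def main_aliases_py_alt (__aliases : List String) : List String :=
  let shorts := __aliases.filter (fun a => !pvIsLong a)
  let longs := __aliases.filter (fun a => pvIsLong a)
  match __aliases with
  | [] => []
  | a :: _ =>
    if pvIsLong a then longs.take 1 ++ shorts.take 1
    else shorts.take 1 ++ longs.take 1

-- ===== PRECONDITION & SPEC =====
def Spec_main_aliases_py (__aliases : List String) (out : List String) : Prop := out = main_aliases_py_alt __aliases
instance (__aliases : List String) (out : List String) : Decidable (Spec_main_aliases_py __aliases out) := by unfold Spec_main_aliases_py; infer_instance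

-- ===== CLAIM (what is proved, stated in full; the proofs are below) =====
def Claim_equal_main_aliases_py : Prop := ∀ (__aliases : List String), Dom_main_aliases_py __aliases → Spec_main_aliases_py __aliases (main_aliases_py __aliases)

-- ===== LEMMAS AND PROOFS =====

-- once both flags are set, the loop breaks immediately
theorem pvGoA_done (rest : List String) (al : List String) : pvGoA rest al true true = al := by
  cases rest <;> simp [pvGoA]

-- with only the long als found, the loop appends the first short als of the rest
theorem pvGoA_short_needed (rest : List String) (al : List String) :
    pvGoA rest al false true = al ++ (rest.filter (fun a => !pvIsLong a)).take 1 := by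
  induction rest generalizing al with
  | nil => simp [pvGoA]
  | cons b r ih =>
    by_cases h : pvIsLong b = true
    · simp [pvGoA, h, ih]
    · simp [pvGoA, h, pvGoA_done]

-- with only the short als found, the loop appends the first long als of the rest
theorem pvGoA_long_needed (rest : List String) (al : List String) :
    pvGoA rest al true false = al ++ (rest.filter (fun a => pvIsLong a)).take 1 := by
  induction rest generalizing al with
  | nil => simp [pvGoA]
  | cons b r ih =>
    by_cases h : pvIsLong b = true
    · simp [pvGoA, h, pvGoA_done]
    · simp [pvGoA, h, ih]

-- ===== VERDICT (by name: the statement is the Claim_ definition above) =====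
theorem main_aliases_py_spec : Claim_equal_main_aliases_py := by
  intro xs _
  unfold Spec_main_aliases_py main_aliases_py main_aliases_py_alt
  cases xs with
  | nil => rfl
  | cons a rest =>
    by_cases h : pvIsLong a = true
    · simp [pvGoA, h, pvGoA_short_needed]
    · simp [pvGoA, h, pvGoA_long_needed]
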